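-- pv_equiv track=rewrite | github.com/max38744/CodingMaster | 01_Basic/8688. 그룹ID.py | gpID
-- ===== SOURCE A (Python) =====
-- def find(parent, x):
--     if parent[x] == x:
--         return x
--     parent[x] = find(parent, parent[x])
--     return parent[x]
--
-- def union(parent, x, y):
--     x = find(parent, x)
--     y = find(parent, y)
--
--     if x != y:
--         parent[max(x, y)] = min(x, y)
--     return
--
-- def gpID(N, data):
--     parent = [i for i in range(N+1)]
--
--     for u, v in data:
--         union(parent, u, v)
--
--     max_cnt = 0
--     answer = 1
--     for i in range(N, 0, -1):
--         if parent.count(i) >= max_cnt: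
--             max_cnt = parent.count(i)
--             answer = i
--
--     return answer
-- ===== SOURCE B (Python) =====
-- def gpID(N, data):
--     parent = list(range(N + 1))
--
--     def find(x):
--         # iterative two-pass find: chase to the root, then compress the
--         # whole path at once (writes happen deepest-first, like reversed(path))
--         path = []
--         while parent[x] != x:
--             path.append(x)
--             x = parent[x]
--         for y in reversed(path):
--             parent[y] = x
--         return x
--
--     for u, v in data:
--         ru, rv = find(u), find(v)
--         if ru != rv:
--             if ru < rv:
--                 parent[rv] = ru
--             else:
--                 parent[ru] = rv
--
--     tally = {}
--     for p in parent:
--         tally[p] = tally.get(p, 0) + 1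
--     best, bc = 1, 0
--     for i in range(1, N + 1):
--         c = tally.get(i, 0)
--         if c > bc:
--             best, bc = i, c
--     return best
-- ===== Notes on version B (the rewrite author's own statement) =====
-- stated objective: faster
-- what changed: B replaces A's recursive path-compressing find by an iterative two-pass find (a loop chases the root collecting the path in an explicit list, then a second loop rewrites the collected path), inlines the union branch without min/max, and replaces A's answer phase, which rescans the whole parent array with parent.count(i) for every i from N down to 1 (O(N^2)), by one dictionary-tally pass plus a single ascending scan with strict '>' to keep the smallest index at ties.
import Mathlib
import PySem

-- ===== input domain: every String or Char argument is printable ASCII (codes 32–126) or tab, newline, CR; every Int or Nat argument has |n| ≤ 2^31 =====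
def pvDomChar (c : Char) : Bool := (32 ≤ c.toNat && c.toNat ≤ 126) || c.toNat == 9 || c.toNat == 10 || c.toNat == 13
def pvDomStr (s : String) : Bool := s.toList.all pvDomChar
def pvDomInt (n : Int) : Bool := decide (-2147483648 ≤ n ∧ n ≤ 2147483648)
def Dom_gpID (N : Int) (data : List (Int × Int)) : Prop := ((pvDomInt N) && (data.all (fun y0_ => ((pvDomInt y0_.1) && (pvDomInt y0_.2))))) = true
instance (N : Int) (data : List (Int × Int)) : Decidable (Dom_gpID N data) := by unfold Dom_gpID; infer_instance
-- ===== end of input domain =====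

-- B replaces A's recursive find by an iterative two-pass find (chase the root into an
-- explicit path list, then compress the whole path), and replaces A's O(N^2) answer
-- phase (parent.count(i) rescanned for each i) by one dict-tally pass plus a single
-- ascending scan (objective: faster, asymptotic).

-- ===== PORT A =====
-- fuel makes Python's unbounded recursion structurally terminating; it is never
-- exhausted on inputs satisfying Pre_gpID (the chase strictly descends from ≤ N).
def findA : Nat → List Int → Int → Option (List Int × Int)
  | 0, _, _ => none
  | fuel+1, parent, x =>
    match PySem.List.pyGet? parent x with
    | none => none                                   -- parent[x] : IndexError
    | some px =>
      if px = x then some (parent, x)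
      else
        match findA fuel parent px with              -- find(parent, parent[x])
        | none => none
        | some (p1, r) =>
          match PySem.List.pySet? p1 x r with        -- parent[x] = …
          | none => none
          | some p2 =>
            match PySem.List.pyGet? p2 x with        -- return parent[x]
            | none => none
            | some v => some (p2, v)

def unionA (fuel : Nat) (parent : List Int) (x y : Int) : Option (List Int) :=
  match findA fuel parent x with
  | none => none
  | some (p1, x') =>
    match findA fuel p1 y with
    | none => none
    | some (p2, y') =>
      if x' ≠ y' then PySem.List.pySet? p2 (max x' y') (min x' y')
      else some p2

def loopA (fuel : Nat) (acc : Option (List Int)) (data : List (Int × Int)) : Option (List Int) :=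
  data.foldl (fun acc uv =>
    match acc with
    | none => none
    | some p => unionA fuel p uv.1 uv.2) acc

def gpID (N : Int) (data : List (Int × Int)) : Int :=
  match loopA ((N + 2).toNat) (some (PySem.List.pyRange 0 (N + 1) 1)) data with
  | none => 0                                        -- Python raised; outside Pre_gpID
  | some parent =>
    ((PySem.List.pyRange N 0 (-1)).foldl
      (fun s i =>
        if ((PySem.List.count parent i : Int)) ≥ s.1 then ((PySem.List.count parent i : Int), i)
        else s)
      ((0 : Int), (1 : Int))).2

-- ===== PORT B =====
-- the while-loop chasing the root, collecting the path (fuel = loop bound, as in A)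
def chaseB : Nat → List Int → Int → Option (List Int × Int)
  | 0, _, _ => none
  | fuel+1, parent, x =>
    match PySem.List.pyGet? parent x with
    | none => none
    | some px =>
      if px = x then some (([] : List Int), x)
      else (chaseB fuel parent px).map (fun pr => (x :: pr.1, pr.2))

-- the 'for y in reversed(path): parent[y] = root' loop
def writeAll (p : List Int) (ys : List Int) (r : Int) : Option (List Int) :=
  ys.foldl (fun acc y => acc.bind (fun q => PySem.List.pySet? q y r)) (some p)

def findB (fuel : Nat) (parent : List Int) (x : Int) : Option (List Int × Int) :=
  match chaseB fuel parent x with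
  | none => none
  | some pr =>
    match writeAll parent pr.1.reverse pr.2 with
    | none => none
    | some p' => some (p', pr.2)

def unionB (fuel : Nat) (parent : List Int) (u v : Int) : Option (List Int) :=
  match findB fuel parent u with
  | none => none
  | some (p1, ru) =>
    match findB fuel p1 v with
    | none => none
    | some (p2, rv) =>
      if ru ≠ rv then
        if ru < rv then PySem.List.pySet? p2 rv ru
        else PySem.List.pySet? p2 ru rv
      else some p2

def loopB (fuel : Nat) (acc : Option (List Int)) (data : List (Int × Int)) : Option (List Int) :=
  data.foldl (fun acc uv =>
    match acc with
    | none => none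
    | some p => unionB fuel p uv.1 uv.2) acc

def gpID_alt (N : Int) (data : List (Int × Int)) : Int :=
  match loopB ((N + 2).toNat) (some (PySem.List.pyRange 0 (N + 1) 1)) data with
  | none => 0
  | some parent =>
    let tally := parent.foldl (fun d x => d.insert x (d.getD x 0 + 1)) PySem.Dict.empty
    ((PySem.List.pyRange 1 (N + 1) 1).foldl
      (fun s i =>
        let c := tally.getD i 0
        if c > s.2 then (i, c) else s)
      ((1 : Int), (0 : Int))).1

-- ===== PRECONDITION & SPEC =====
-- Pre_: every listed pair is a valid Python index into parent (length N+1,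
-- negative indexes count from the end); outside this A raises IndexError.
def Pre_gpID (N : Int) (data : List (Int × Int)) : Prop :=
  ∀ p ∈ data, (-(N + 1) ≤ p.1 ∧ p.1 ≤ N) ∧ (-(N + 1) ≤ p.2 ∧ p.2 ≤ N)
instance (N : Int) (data : List (Int × Int)) : Decidable (Pre_gpID N data) := by
  unfold Pre_gpID; infer_instance
def pvWitness_gpID : Int × (List (Int × Int)) := (3, [(0, 1), (1, 2), (-1, 0)])

def Spec_gpID (N : Int) (data : List (Int × Int)) (out : Int) : Prop := out = gpID_alt N data
instance (N : Int) (data : List (Int × Int)) (out : Int) : Decidable (Spec_gpID N data out) := by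
  unfold Spec_gpID; infer_instance

-- ===== CLAIM (what is proved, stated in full; the proofs are below) =====
def Claim_equal_gpID : Prop := ∀ (N : Int) (data : List (Int × Int)), Dom_gpID N data → Pre_gpID N data → Spec_gpID N data (gpID N data)

-- ===== LEMMAS AND PROOFS =====

-- a normalized Python index is a valid list position
theorem pyIdx?_lt' {len : Nat} {i : Int} {k : Nat}
    (h : PySem.List.pyIdx? len i = some k) : k < len := by
  unfold PySem.List.pyIdx? at h
  split_ifs at h with h1 h2 h3 <;>
    first
    | (injection h with h; omega)
    | exact absurd h (by simp)

-- writing then reading back the same index gives the written value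
theorem pySet_pyGet {xs p2 : List Int} {i v : Int}
    (h : PySem.List.pySet? xs i v = some p2) : PySem.List.pyGet? p2 i = some v := by
  unfold PySem.List.pySet? at h
  unfold PySem.List.pyGet?
  cases hk : PySem.List.pyIdx? xs.length i with
  | none => rw [hk] at h; simp at h
  | some k =>
    rw [hk] at h
    simp only [Option.map_some] at h
    have hklt : k < xs.length := pyIdx?_lt' hk
    obtain rfl : xs.set k v = p2 := by exact Option.some.inj h
    rw [List.length_set, hk]
    simp [hklt]

theorem writeAll_append (p : List Int) (l : List Int) (x r : Int) :
    writeAll p (l ++ [x]) r = (writeAll p l r).bind (fun q => PySem.List.pySet? q x r) := by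
  unfold writeAll
  rw [List.foldl_append]
  rfl

-- A's recursive find and B's iterative two-pass find perform the same sequence of
-- writes (deepest path node first) and return the same root.
theorem findAB : ∀ (f : Nat) (p : List Int) (x : Int), findA f p x = findB f p x
  | 0, _, _ => rfl
  | f+1, p, x => by
    simp only [findA, findB, chaseB]
    cases hg : PySem.List.pyGet? p x with
    | none => rfl
    | some px =>
      by_cases hpx : px = x
      · simp [hpx, writeAll]
      · simp only [if_neg hpx]
        rw [findAB f p px]
        unfold findB
        cases hc : chaseB f p px with
        | none => rfl
        | some pr =>
          obtain ⟨pa, r⟩ := pr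
          simp only [Option.map_some, List.reverse_cons, writeAll_append]
          cases hw : writeAll p pa.reverse r with
          | none => rfl
          | some p1 =>
            simp only [Option.bind_some]
            cases hs : PySem.List.pySet? p1 x r with
            | none => rfl
            | some p2 =>
              simp only []
              rw [pySet_pyGet hs]

theorem unionAB (f : Nat) (p : List Int) (x y : Int) : unionA f p x y = unionB f p x y := by
  unfold unionA unionB
  rw [findAB]
  cases findB f p x with
  | none => rfl
  | some pr =>
    obtain ⟨p1, x'⟩ := pr
    dsimp only
    rw [findAB]
    cases findB f p1 y with
    | none => rfl
    | some qr =>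
      obtain ⟨p2, y'⟩ := qr
      dsimp only
      by_cases h : x' = y'
      · simp [h]
      · simp only [ne_eq, h, not_false_eq_true, if_true]
        by_cases h2 : x' < y'
        · simp only [if_pos h2]
          rw [show max x' y' = y' by omega, show min x' y' = x' by omega]
        · simp only [if_neg h2]
          rw [show max x' y' = x' by omega, show min x' y' = y' by omega]

theorem loopAB (fuel : Nat) (acc : Option (List Int)) (data : List (Int × Int)) :
    loopA fuel acc data = loopB fuel acc data := by
  unfold loopA loopB
  congr 1
  funext a uv
  cases a with
  | none => rfl
  | some p => exact unionAB fuel p uv.1 uv.2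

-- the counting phase, abstracted
def pcount (p : List Int) (i : Int) : Int := (PySem.List.count p i : Int)

def stepA (p : List Int) (s : Int × Int) (i : Int) : Int × Int :=
  if pcount p i ≥ s.1 then (pcount p i, i) else s

def stepB (p : List Int) (s : Int × Int) (i : Int) : Int × Int :=
  if pcount p i > s.2 then (i, pcount p i) else s

def Af (p : List Int) (s : Int × Int) (k : Int) : Int × Int :=
  (PySem.List.pyRange k 0 (-1)).foldl (stepA p) s

def Bf (p : List Int) (k : Int) : Int × Int :=
  (PySem.List.pyRange 1 (k + 1) 1).foldl (stepB p) ((1 : Int), (0 : Int))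

theorem pcount_nonneg (p : List Int) (i : Int) : 0 ≤ pcount p i := Int.natCast_nonneg _

theorem Af_zero (p : List Int) (s : Int × Int) {k : Int} (hk : k ≤ 0) : Af p s k = s := by
  unfold Af; rw [PySem.List.pyRange_neg_one_eq_nil hk]; rfl

theorem Af_succ (p : List Int) (s : Int × Int) {k : Int} (hk : 0 < k) :
    Af p s k = Af p (stepA p s k) (k - 1) := by
  unfold Af; rw [PySem.List.pyRange_neg_one_cons hk]; rfl

theorem Bf_zero (p : List Int) {k : Int} (hk : k ≤ 0) : Bf p k = (1, 0) := by
  unfold Bf; rw [PySem.List.pyRange_one_eq_nil (by omega)]; rfl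

theorem Bf_succ (p : List Int) {k : Int} (hk : 0 ≤ k) :
    Bf p (k + 1) = stepB p (Bf p k) (k + 1) := by
  unfold Bf
  rw [PySem.List.pyRange_one_succ_right (by omega : (1 : Int) ≤ k + 1), List.foldl_append]
  rfl

theorem Bf_nonneg (p : List Int) : ∀ n : Nat, 0 ≤ (Bf p (n : Int)).2 := by
  intro n
  induction n with
  | zero => simp only [Nat.cast_zero]; rw [Bf_zero p le_rfl]
  | succ n ih =>
    have hcast : ((n + 1 : Nat) : Int) = (n : Int) + 1 := by push_cast; ring
    rw [hcast, Bf_succ p (Int.natCast_nonneg n)]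
    unfold stepB
    split_ifs with h
    · exact pcount_nonneg p _
    · exact ih

theorem AfBf (p : List Int) : ∀ (n : Nat) (mc ans : Int), 0 ≤ mc →
    Af p (mc, ans) (n : Int) =
      if (Bf p (n : Int)).2 ≥ mc ∧ 0 < n then ((Bf p (n : Int)).2, (Bf p (n : Int)).1)
      else (mc, ans) := by
  intro n
  induction n with
  | zero =>
    intro mc ans hmc
    simp only [Nat.cast_zero]
    rw [Af_zero p _ le_rfl]
    simp
  | succ n ih =>
    intro mc ans hmc
    have hcast : ((n + 1 : Nat) : Int) = (n : Int) + 1 := by push_cast; ring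
    rw [hcast, Af_succ p _ (by omega : (0 : Int) < (n : Int) + 1),
        show (n : Int) + 1 - 1 = (n : Int) by ring,
        Bf_succ p (Int.natCast_nonneg n)]
    have hc0 : 0 ≤ pcount p ((n : Int) + 1) := pcount_nonneg p _
    have hB2 : 0 ≤ (Bf p (n : Int)).2 := Bf_nonneg p n
    rcases hBf : Bf p (n : Int) with ⟨b1, b2⟩
    rw [hBf] at ih hB2
    simp only [] at hB2
    unfold stepA stepB
    rw [show ((b1, b2) : Int × Int).2 = b2 from rfl]
    by_cases hgt : pcount p ((n : Int) + 1) > b2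
    · rw [if_pos hgt]
      rw [show (((n : Int) + 1, pcount p ((n : Int) + 1))).2 = pcount p ((n : Int) + 1) from rfl,
          show (((n : Int) + 1, pcount p ((n : Int) + 1))).1 = (n : Int) + 1 from rfl]
      by_cases hcc : pcount p ((n : Int) + 1) ≥ mc
      · rw [if_pos hcc, ih _ ((n : Int) + 1) hc0, if_neg (by omega), if_pos ⟨hcc, by omega⟩]
      · rw [if_neg hcc, ih mc ans hmc, if_neg (by omega), if_neg (by omega)]
    · rw [if_neg hgt]
      rw [show (((b1 : Int), (b2 : Int))).2 = b2 from rfl,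
          show (((b1 : Int), (b2 : Int))).1 = b1 from rfl]
      push_neg at hgt
      by_cases hcc : pcount p ((n : Int) + 1) ≥ mc
      · rw [if_pos hcc, ih _ ((n : Int) + 1) hc0]
        rcases Nat.eq_zero_or_pos n with h0 | h0
        · subst h0
          have hz : Bf p ((0 : Nat) : Int) = (1, 0) := by
            simp only [Nat.cast_zero]; exact Bf_zero p le_rfl
          rw [hBf] at hz
          injection hz with hz1 hz2
          subst hz1; subst hz2
          rw [if_neg (by omega), if_pos ⟨by omega, by omega⟩]
          rw [Prod.mk.injEq]
          constructor <;> omega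
        · rw [if_pos ⟨hgt, h0⟩, if_pos ⟨le_trans hcc hgt, by omega⟩]
      · rw [if_neg hcc, ih mc ans hmc]
        push_neg at hcc
        rcases Nat.eq_zero_or_pos n with h0 | h0
        · subst h0
          have hz : Bf p ((0 : Nat) : Int) = (1, 0) := by
            simp only [Nat.cast_zero]; exact Bf_zero p le_rfl
          rw [hBf] at hz
          injection hz with hz1 hz2
          subst hz1; subst hz2
          rw [if_neg (by omega), if_neg (by omega)]
        · by_cases hbm : b2 ≥ mc
          · rw [if_pos ⟨hbm, h0⟩, if_pos ⟨hbm, by omega⟩]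
          · rw [if_neg (by omega), if_neg (by omega)]

theorem countEq (p : List Int) (N : Int) :
    (Af p ((0 : Int), (1 : Int)) N).2 = (Bf p N).1 := by
  by_cases hN : N ≤ 0
  · rw [Af_zero p _ hN, Bf_zero p hN]
  · push_neg at hN
    obtain ⟨n, rfl⟩ : ∃ n : Nat, N = (n : Int) :=
      ⟨N.toNat, (Int.toNat_of_nonneg (le_of_lt hN)).symm⟩
    rw [AfBf p n 0 1 le_rfl]
    rw [if_pos ⟨Bf_nonneg p n, by exact_mod_cast hN⟩]

theorem tally_getD (p : List Int) (i : Int) :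
    (p.foldl (fun d x => d.insert x (d.getD x 0 + 1)) PySem.Dict.empty).getD i 0 = pcount p i := by
  rw [PySem.Dict.getD_foldl_insert_add_one]
  simp [pcount, PySem.List.count_eq, PySem.Dict.getD_empty]

theorem gpID_eq (N : Int) (data : List (Int × Int)) : gpID N data = gpID_alt N data := by
  unfold gpID gpID_alt
  rw [loopAB]
  cases loopB ((N + 2).toNat) (some (PySem.List.pyRange 0 (N + 1) 1)) data with
  | none => rfl
  | some parent =>
    show (Af parent ((0 : Int), (1 : Int)) N).2 =
      ((PySem.List.pyRange 1 (N + 1) 1).foldl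
        (fun s i =>
          let c := (parent.foldl (fun d x => d.insert x (d.getD x 0 + 1))
                      PySem.Dict.empty).getD i 0
          if c > s.2 then (i, c) else s)
        ((1 : Int), (0 : Int))).1
    have hstep : (fun (s : Int × Int) (i : Int) =>
        let c := (parent.foldl (fun d x => d.insert x (d.getD x 0 + 1))
                    PySem.Dict.empty).getD i 0
        if c > s.2 then (i, c) else s) = stepB parent := by
      funext s i
      simp only [tally_getD]
      rfl
    rw [hstep]
    exact countEq parent N

-- ===== VERDICT (by name: the statement is the Claim_ definition above) =====
theorem gpID_spec : Claim_equal_gpID := by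
  intro N data _ _
  unfold Spec_gpID
  exact gpID_eq N data
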